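-- pv_equiv track=rewrite | github.com/jllpons/TFG_DGEanalysis | dge_analysis/filter_dataframe.py | get_gene_ids_list_for_intersections
-- ===== SOURCE A (Python) =====
-- def get_gene_ids_list_for_intersections(
--         set1,
--         set2,
--         set3,
--         ):
--     """
--     Computes lists contaning gene_ids. Generates one list for each intersection.
--     Returns a dictionary where the k eys are binary numbers that represent the
--     list for each intersection:
--         - First bit equals to the first set.
--         - Second bit equals to the second set.
--         - Third bit equals to the third set.
--     """
--
--     intersections_dict = {}
--     intersections_dict["100"] = [i for i in set1 if i not in set2 and i not in set3]
--     intersections_dict["110"] = [i for i in set1 if i in set2 and i not in set3]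
--     intersections_dict["101"] = [i for i in set1 if i not in set2 and i in set3]
--     intersections_dict["111"] = [i for i in set1 if i in set2 and i in set3]
--     intersections_dict["010"] = [i for i in set2 if i not in set1 and i not in set3]
--     intersections_dict["011"] = [i for i in set2 if i not in set1 and i in set3]
--     intersections_dict["001"] = [i for i in set3 if i not in set1 and i not in set2]
--
--     return intersections_dict
-- ===== SOURCE B (Python) =====
-- def get_gene_ids_list_for_intersections(
--         set1,
--         set2,
--         set3,
--         ):
--     """Same Venn partition, computed with three single classifying passes
--     instead of seven filtered scans."""
--     buckets = {k: [] for k in ("100", "110", "101", "111", "010", "011", "001")}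
--     m1, m2, m3 = set(set1), set(set2), set(set3)
--     for i in set1:
--         buckets["1%d%d" % (i in m2, i in m3)].append(i)
--     for i in set2:
--         if i not in m1:
--             buckets["01%d" % (i in m3)].append(i)
--     for i in set3:
--         if i not in m1 and i not in m2:
--             buckets["001"].append(i)
--     return buckets
-- ===== Notes on version B (the rewrite author's own statement) =====
-- stated objective: faster
-- what changed: Seven repeated filtered scans (each with linear membership tests) are replaced by three single classifying passes that append each element to its Venn bucket, using hash sets for membership.
import Mathlib
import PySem

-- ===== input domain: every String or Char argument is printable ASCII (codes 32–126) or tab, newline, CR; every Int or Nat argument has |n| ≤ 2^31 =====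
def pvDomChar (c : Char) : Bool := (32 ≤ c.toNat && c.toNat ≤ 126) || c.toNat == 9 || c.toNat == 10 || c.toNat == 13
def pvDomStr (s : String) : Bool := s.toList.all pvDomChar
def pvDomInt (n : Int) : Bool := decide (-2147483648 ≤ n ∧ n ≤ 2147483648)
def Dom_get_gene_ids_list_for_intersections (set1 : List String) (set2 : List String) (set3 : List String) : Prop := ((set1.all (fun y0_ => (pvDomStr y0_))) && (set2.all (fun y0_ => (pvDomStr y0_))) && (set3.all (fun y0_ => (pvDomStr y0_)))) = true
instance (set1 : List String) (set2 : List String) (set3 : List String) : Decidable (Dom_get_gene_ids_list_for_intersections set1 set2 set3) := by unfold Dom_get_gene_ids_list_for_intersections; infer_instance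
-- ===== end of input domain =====

-- B replaces A's seven filtered scans with three single classifying passes (asymptotically faster in Python via hash sets).


-- ===== PORT A =====
-- A fills a fresh dict with seven distinct keys in this order; each comprehension is a filter
-- with Python 'in' = List.contains.
def get_gene_ids_list_for_intersections (set1 : List String) (set2 : List String) (set3 : List String) : List (String × List String) :=
  [("100", set1.filter (fun i => !set2.contains i && !set3.contains i)),
   ("110", set1.filter (fun i => set2.contains i && !set3.contains i)),
   ("101", set1.filter (fun i => !set2.contains i && set3.contains i)),
   ("111", set1.filter (fun i => set2.contains i && set3.contains i)),
   ("010", set2.filter (fun i => !set1.contains i && !set3.contains i)),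
   ("011", set2.filter (fun i => !set1.contains i && set3.contains i)),
   ("001", set3.filter (fun i => !set1.contains i && !set2.contains i))]

-- ===== PORT B =====
-- B's first pass over set1: classify each element into the four '1??' buckets
-- (membership in Python's set(set2)/set(set3) is the same predicate as List.contains).
-- Python appends front-to-back; the structural recursion builds the same lists back-to-front.
def pvClassify1 (s2 s3 : List String) : List String → List String × List String × List String × List String
  | [] => ([], [], [], [])
  | i :: rest =>
    let r := pvClassify1 s2 s3 rest
    if s2.contains i then
      if s3.contains i then (r.1, r.2.1, r.2.2.1, i :: r.2.2.2)
      else (r.1, i :: r.2.1, r.2.2.1, r.2.2.2)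
    else
      if s3.contains i then (r.1, r.2.1, i :: r.2.2.1, r.2.2.2)
      else (i :: r.1, r.2.1, r.2.2.1, r.2.2.2)

-- B's second pass over set2: elements not in set1 go to '010' or '011'.
def pvClassify2 (s1 s3 : List String) : List String → List String × List String
  | [] => ([], [])
  | i :: rest =>
    let r := pvClassify2 s1 s3 rest
    if s1.contains i then r
    else if s3.contains i then (r.1, i :: r.2) else (i :: r.1, r.2)

-- B's third pass over set3: elements in neither set1 nor set2 go to '001'.
def pvClassify3 (s1 s2 : List String) : List String → List String
  | [] => []
  | i :: rest =>
    let r := pvClassify3 s1 s2 rest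
    if s1.contains i || s2.contains i then r else i :: r

def get_gene_ids_list_for_intersections_alt (set1 : List String) (set2 : List String) (set3 : List String) : List (String × List String) :=
  let c1 := pvClassify1 set2 set3 set1
  let c2 := pvClassify2 set1 set3 set2
  let c3 := pvClassify3 set1 set2 set3
  [("100", c1.1), ("110", c1.2.1), ("101", c1.2.2.1), ("111", c1.2.2.2),
   ("010", c2.1), ("011", c2.2),
   ("001", c3)]

-- ===== PRECONDITION & SPEC =====
def Spec_get_gene_ids_list_for_intersections (set1 : List String) (set2 : List String) (set3 : List String) (out : List (String × List String)) : Prop := out = get_gene_ids_list_for_intersections_alt set1 set2 set3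
instance (set1 : List String) (set2 : List String) (set3 : List String) (out : List (String × List String)) : Decidable (Spec_get_gene_ids_list_for_intersections set1 set2 set3 out) := by unfold Spec_get_gene_ids_list_for_intersections; infer_instance

-- ===== CLAIM (what is proved, stated in full; the proofs are below) =====
def Claim_equal_get_gene_ids_list_for_intersections : Prop := ∀ (set1 : List String) (set2 : List String) (set3 : List String), Dom_get_gene_ids_list_for_intersections set1 set2 set3 → Spec_get_gene_ids_list_for_intersections set1 set2 set3 (get_gene_ids_list_for_intersections set1 set2 set3)

-- ===== LEMMAS AND PROOFS =====
theorem pvClassify1_eq (s2 s3 l : List String) :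
    pvClassify1 s2 s3 l =
      (l.filter (fun i => !s2.contains i && !s3.contains i),
       l.filter (fun i => s2.contains i && !s3.contains i),
       l.filter (fun i => !s2.contains i && s3.contains i),
       l.filter (fun i => s2.contains i && s3.contains i)) := by
  induction l with
  | nil => rfl
  | cons i rest ih =>
    simp only [pvClassify1, ih, List.filter_cons]
    by_cases h2 : i ∈ s2 <;> by_cases h3 : i ∈ s3 <;> simp [h2, h3]

theorem pvClassify2_eq (s1 s3 l : List String) :
    pvClassify2 s1 s3 l =
      (l.filter (fun i => !s1.contains i && !s3.contains i),
       l.filter (fun i => !s1.contains i && s3.contains i)) := by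
  induction l with
  | nil => rfl
  | cons i rest ih =>
    simp only [pvClassify2, ih, List.filter_cons]
    by_cases h1 : i ∈ s1 <;> by_cases h3 : i ∈ s3 <;> simp [h1, h3]

theorem pvClassify3_eq (s1 s2 l : List String) :
    pvClassify3 s1 s2 l = l.filter (fun i => !s1.contains i && !s2.contains i) := by
  induction l with
  | nil => rfl
  | cons i rest ih =>
    simp only [pvClassify3, ih, List.filter_cons]
    by_cases h1 : i ∈ s1 <;> by_cases h2 : i ∈ s2 <;> simp [h1, h2]

-- ===== VERDICT (by name: the statement is the Claim_ definition above) =====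
theorem get_gene_ids_list_for_intersections_spec : Claim_equal_get_gene_ids_list_for_intersections := by
  intro set1 set2 set3 _
  unfold Spec_get_gene_ids_list_for_intersections
  simp [get_gene_ids_list_for_intersections, get_gene_ids_list_for_intersections_alt,
    pvClassify1_eq, pvClassify2_eq, pvClassify3_eq]
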